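-- pv_equiv track=rewrite | github.com/givemethatsewon/PS | programmers/[150367] 표현 가능한 이진트리/python/150367.py | solution
-- ===== SOURCE A (Python) =====
-- def solution(numbers):
--     results = []
--     for number in numbers:
--         bin_str = bin(number)[2:]
--         length = len(bin_str)
--
--         # 최소한의 이진트리 높이 계산
--         h = 0
--         while (1 << h) - 1 < length:
--             h += 1
--         total_length = (1 << h) - 1
--
--         padded_bin = bin_str.zfill(total_length)
--
--         result = 1 if is_valid(padded_bin) else 0
--         results.append(result)
--
--     return results
--
-- def is_valid(binary: str) -> bool:
--     # base case
--     if len(binary) == 1: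
--         return True
--
--     # 탐색
--     mid = len(binary) // 2
--     root = binary[mid]
--     left = binary[:mid]
--     right = binary[mid+1:]
--
--     if root == '0':
--         if '1' in binary:
--             return False
--         else:
--             return True
--     else:
--         return is_valid(left) and is_valid(right)
-- ===== SOURCE B (Python) =====
-- # Same padded binary string per number, but the recursive validity check is
-- # replaced by an explicit worklist (stack) of subtree substrings (fail-fast AND).
-- def check(n):
--     s = bin(n)[2:]
--     size = 1
--     while size < len(s):
--         size = 2 * size + 1
--     stack = ['0' * (size - len(s)) + s]
--     while stack:
--         t = stack.pop()
--         if len(t) == 1: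
--             continue
--         mid = len(t) // 2
--         if t[mid] == '0':
--             if '1' in t:
--                 return 0
--         else:
--             stack.append(t[:mid])
--             stack.append(t[mid + 1:])
--     return 1
--
--
-- def solution(numbers):
--     return [check(n) for n in numbers]
-- ===== Notes on version B (the rewrite author's own statement) =====
-- stated objective: alternative
-- what changed: The recursive is_valid over subtree substrings is replaced by an explicit fail-fast worklist (stack) of substrings drained iteratively, and the per-number work is factored into a helper used by a comprehension instead of an accumulator loop.
import Mathlib
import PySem

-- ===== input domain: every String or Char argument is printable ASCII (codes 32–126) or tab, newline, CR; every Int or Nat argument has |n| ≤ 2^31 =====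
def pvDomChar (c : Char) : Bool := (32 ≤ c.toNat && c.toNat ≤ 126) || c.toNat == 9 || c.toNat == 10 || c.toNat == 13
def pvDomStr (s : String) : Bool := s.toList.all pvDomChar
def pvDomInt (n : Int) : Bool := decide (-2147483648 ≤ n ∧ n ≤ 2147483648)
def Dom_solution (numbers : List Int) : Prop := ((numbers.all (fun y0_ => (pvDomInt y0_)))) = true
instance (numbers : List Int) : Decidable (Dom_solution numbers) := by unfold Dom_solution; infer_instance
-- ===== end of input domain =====

-- B replaces the recursive is_valid over subtree substrings by an explicit
-- fail-fast worklist (stack) of substrings (alternative decomposition, same cost).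
-- Loops/recursions are transcribed with a structural fuel parameter that is
-- always sufficient (a totality guard only; the fuel-0 cases are unreachable).

-- ===== PORT A =====
-- binary digits of n, most significant first (the digit loop behind bin(n));
-- fuel n+1 always suffices since n at least halves each step
def natBitsF : Nat → Nat → List Char
  | 0, _ => []
  | fuel + 1, n =>
    if n < 2 then [if n == 1 then '1' else '0']
    else natBitsF fuel (n / 2) ++ [if n % 2 == 1 then '1' else '0']

def natBits (n : Nat) : List Char := natBitsF (n + 1) n

-- bin(number)[2:]; for a negative int Python yields 'b' followed by the digits of |n|
def pyBinTail (n : Int) : List Char :=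
  if n < 0 then 'b' :: natBits (-n).toNat else natBits n.toNat

-- while (1 << h) - 1 < length: h += 1   (fuel length+1 suffices: 2^h-1 ≥ h)
def hLoopF : Nat → Nat → Nat → Nat
  | 0, h, _ => h
  | fuel + 1, h, len => if 2 ^ h - 1 < len then hLoopF fuel (h + 1) len else h

-- is_valid, step for step, recursion bounded by the string length
-- (the length-0 branch only makes it total: Python raises IndexError there
-- and solution never calls it on such input)
def isValidF : Nat → List Char → Bool
  | 0, _ => true
  | fuel + 1, s =>
    if s.length == 1 then true
    else if s.length == 0 then true
    else
      -- mid = len//2, root = s[mid], left = s[:mid], right = s[mid+1:]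
      if s.getD (s.length / 2) ' ' == '0' then
        if s.contains '1' then false else true
      else isValidF fuel (s.take (s.length / 2)) && isValidF fuel (s.drop (s.length / 2 + 1))

def isValid (s : List Char) : Bool := isValidF s.length s

def solution (numbers : List Int) : List Int :=
  numbers.foldl (fun results number =>
    let binStr := pyBinTail number
    let length := binStr.length
    let h := hLoopF (length + 1) 0 length
    let total := 2 ^ h - 1
    let padded := List.replicate (total - length) '0' ++ binStr  -- zfill (no sign char present)
    results ++ [if isValid padded then (1 : Int) else 0]) []

-- ===== PORT B =====
-- while size < len(s): size = 2*size + 1   (fuel length+1 suffices)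
def sizeLoopF : Nat → Nat → Nat → Nat
  | 0, size, _ => size
  | fuel + 1, size, len => if size < len then sizeLoopF fuel (2 * size + 1) len else size

-- the worklist loop of Source B; head of the list = top of the stack; the fuel
-- Σ (2*|t|+1) over the stack strictly decreases per iteration, so the initial
-- fuel 2*size+1 suffices (the length-0 branch is again only a totality guard)
def drainF : Nat → List (List Char) → Bool
  | 0, _ => true
  | fuel + 1, stack =>
    match stack with
    | [] => true
    | t :: rest =>
      if t.length == 1 then drainF fuel rest
      else if t.length == 0 then drainF fuel rest
      else
        -- mid = len(t)//2; stack.append(t[:mid]); stack.append(t[mid+1:])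
        if t.getD (t.length / 2) ' ' == '0' then
          if t.contains '1' then false else drainF fuel rest
        else drainF fuel (t.drop (t.length / 2 + 1) :: t.take (t.length / 2) :: rest)

def check (n : Int) : Int :=
  let s := pyBinTail n
  let size := sizeLoopF (s.length + 1) 1 s.length
  if drainF (2 * size + 1) [List.replicate (size - s.length) '0' ++ s] then 1 else 0

def solution_alt (numbers : List Int) : List Int := numbers.map check

-- ===== PRECONDITION & SPEC =====
def Spec_solution (numbers : List Int) (out : List Int) : Prop := out = solution_alt numbers
instance (numbers : List Int) (out : List Int) : Decidable (Spec_solution numbers out) := by unfold Spec_solution; infer_instance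

-- ===== CLAIM (what is proved, stated in full; the proofs are below) =====
def Claim_equal_solution : Prop := ∀ (numbers : List Int), Dom_solution numbers → Spec_solution numbers (solution numbers)

-- ===== LEMMAS AND PROOFS =====

-- isValidF does not depend on the fuel once it covers the string length
theorem isValidF_fuel (f1 : Nat) : ∀ (f2 : Nat) (s : List Char),
    s.length ≤ f1 → s.length ≤ f2 → isValidF f1 s = isValidF f2 s := by
  induction f1 with
  | zero =>
      intro f2 s h1 _
      have hs : s.length = 0 := Nat.le_zero.mp h1
      cases f2 with
      | zero => rfl
      | succ g => rw [isValidF, isValidF]; simp [hs]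
  | succ f ih =>
      intro f2 s h1 h2
      cases f2 with
      | zero =>
          have hs : s.length = 0 := Nat.le_zero.mp h2
          rw [isValidF, isValidF]; simp [hs]
      | succ g =>
          by_cases e1 : s.length = 1
          · rw [isValidF, isValidF]; simp [e1]
          · by_cases e0 : s.length = 0
            · rw [isValidF, isValidF]; simp [e0]
            · have h2le : 2 ≤ s.length := by omega
              have htake : (List.take (s.length / 2) s).length ≤ s.length - 1 := by
                simp only [List.length_take]; omega
              have hdrop : (List.drop (s.length / 2 + 1) s).length ≤ s.length - 1 := by
                simp only [List.length_drop]; omega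
              have e1b : (s.length == 1) = false := by simp [e1]
              have e0b : (s.length == 0) = false := by simp [e0]
              rw [isValidF, isValidF]
              simp only [e1b, e0b, Bool.false_eq_true, if_false]
              rw [ih g (List.take (s.length / 2) s) (by omega) (by omega),
                  ih g (List.drop (s.length / 2 + 1) s) (by omega) (by omega)]

-- one-step characterisation of isValid on strings of length ≥ 2
theorem isValid_unfold (s : List Char) (h2 : 2 ≤ s.length) :
    isValid s =
      (if s.getD (s.length / 2) ' ' == '0' then
        (if s.contains '1' then false else true)
      else isValid (s.take (s.length / 2)) && isValid (s.drop (s.length / 2 + 1))) := by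
  obtain ⟨k, hk⟩ : ∃ k, s.length = k + 1 := ⟨s.length - 1, by omega⟩
  have hstep : isValid s = isValidF (k + 1) s := by rw [isValid, hk]
  have e1b : (s.length == 1) = false := by
    simp only [beq_eq_false_iff_ne, ne_eq]; omega
  have e0b : (s.length == 0) = false := by
    simp only [beq_eq_false_iff_ne, ne_eq]; omega
  rw [hstep, isValidF]
  simp only [e1b, e0b, Bool.false_eq_true, if_false]
  have htk : (List.take (s.length / 2) s).length ≤ k := by
    simp only [List.length_take]; omega
  have hdk : (List.drop (s.length / 2 + 1) s).length ≤ k := by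
    simp only [List.length_drop]; omega
  rw [isValidF_fuel k (List.take (s.length / 2) s).length (List.take (s.length / 2) s) htk le_rfl,
      isValidF_fuel k (List.drop (s.length / 2 + 1) s).length (List.drop (s.length / 2 + 1) s) hdk le_rfl]
  rfl

-- the worklist measure
def stackFuel (stack : List (List Char)) : Nat :=
  (stack.map fun u => 2 * u.length + 1).sum

-- the worklist result is the conjunction of the recursive checks of its elements
theorem drainF_eq_all (fuel : Nat) : ∀ (stack : List (List Char)),
    stackFuel stack ≤ fuel → drainF fuel stack = stack.all isValid := by
  induction fuel with
  | zero =>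
      intro stack h
      cases stack with
      | nil => rfl
      | cons t rest =>
          exfalso
          simp only [stackFuel, List.map_cons, List.sum_cons] at h
          omega
  | succ f ih =>
      intro stack h
      cases stack with
      | nil => rfl
      | cons t rest =>
          have hM : 2 * t.length + 1 + stackFuel rest ≤ f + 1 := by
            simpa [stackFuel] using h
          have hrest : stackFuel rest ≤ f := by omega
          rw [List.all_cons, ← ih rest hrest]
          by_cases e1 : t.length = 1
          · have e1b : (t.length == 1) = true := by simp [e1]
            have hv : isValid t = true := by
              rw [isValid, e1, isValidF]; simp [e1]
            rw [drainF]
            simp only [e1b, if_true, hv, Bool.true_and]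
          · have e1b : (t.length == 1) = false := by simp [e1]
            by_cases e0 : t.length = 0
            · have e0b : (t.length == 0) = true := by simp [e0]
              have hv : isValid t = true := by rw [isValid, e0, isValidF]
              rw [drainF]
              simp only [e1b, e0b, Bool.false_eq_true, if_false, if_true, hv, Bool.true_and]
            · have e0b : (t.length == 0) = false := by simp [e0]
              have h2 : 2 ≤ t.length := by omega
              have hu := isValid_unfold t h2
              rw [drainF]
              simp only [e1b, e0b, Bool.false_eq_true, if_false]
              by_cases hr : (t.getD (t.length / 2) ' ' == '0') = true
              · rw [hu]
                simp only [hr, if_true]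
                by_cases hc : t.contains '1' = true
                · simp only [hc, if_true, Bool.false_and]
                · simp only [hc, Bool.false_eq_true, if_false, Bool.true_and]
              · have hrb : (t.getD (t.length / 2) ' ' == '0') = false := by
                  simpa using hr
                rw [hu]
                simp only [hrb, Bool.false_eq_true, if_false]
                have hpush : stackFuel (t.drop (t.length / 2 + 1) :: t.take (t.length / 2) :: rest) ≤ f := by
                  simp only [stackFuel, List.map_cons, List.sum_cons, List.length_take,
                    List.length_drop] at *
                  omega
                rw [ih _ hpush]
                simp only [List.all_cons, ih rest hrest]
                ac_rfl

-- the size loop computes 2^h - 1 along the height loop (same fuel)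
theorem sizeLoopF_eq (fuel : Nat) : ∀ (h len : Nat),
    sizeLoopF fuel (2 ^ h - 1) len = 2 ^ hLoopF fuel h len - 1 := by
  induction fuel with
  | zero => intro h len; rfl
  | succ f ih =>
      intro h len
      have h1 : 1 ≤ 2 ^ h := Nat.one_le_two_pow
      have h2 : 2 * (2 ^ h - 1) + 1 = 2 ^ (h + 1) - 1 := by rw [pow_succ]; omega
      by_cases hc : 2 ^ h - 1 < len
      · rw [sizeLoopF, hLoopF, if_pos hc, if_pos hc, h2, ih]
      · rw [sizeLoopF, hLoopF, if_neg hc, if_neg hc]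

-- the height loop does not depend on the fuel once h + fuel covers len
theorem hLoopF_fuel (f1 : Nat) : ∀ (f2 h len : Nat),
    len ≤ h + f1 → len ≤ h + f2 → hLoopF f1 h len = hLoopF f2 h len := by
  induction f1 with
  | zero =>
      intro f2 h len h1 h2
      have hstop : ¬ 2 ^ h - 1 < len := by
        have := Nat.lt_two_pow_self (n := h)
        omega
      cases f2 with
      | zero => rfl
      | succ g => rw [hLoopF, hLoopF, if_neg hstop]
  | succ f ih =>
      intro f2 h len h1 h2
      cases f2 with
      | zero =>
          have hstop : ¬ 2 ^ h - 1 < len := by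
            have := Nat.lt_two_pow_self (n := h)
            omega
          rw [hLoopF, hLoopF, if_neg hstop]
      | succ g =>
          by_cases hc : 2 ^ h - 1 < len
          · rw [hLoopF, hLoopF, if_pos hc, if_pos hc]
            exact ih g (h + 1) len (by omega) (by omega)
          · rw [hLoopF, hLoopF, if_neg hc, if_neg hc]

-- the height loop's postcondition: the padded length covers the string
theorem hLoopF_post (f : Nat) : ∀ (h len : Nat), len ≤ h + f → len ≤ 2 ^ hLoopF f h len - 1 := by
  induction f with
  | zero =>
      intro h len h1
      have := Nat.lt_two_pow_self (n := h)
      simpa [hLoopF] using by omega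
  | succ f ih =>
      intro h len h1
      by_cases hc : 2 ^ h - 1 < len
      · rw [hLoopF, if_pos hc]
        exact ih (h + 1) len (by omega)
      · rw [hLoopF, if_neg hc]
        omega

theorem natBitsF_ne_nil (fuel : Nat) : ∀ (n : Nat), 1 ≤ (natBitsF (fuel + 1) n).length := by
  induction fuel with
  | zero => intro n; by_cases h : n < 2 <;> simp [natBitsF, h]
  | succ f ih =>
      intro n
      by_cases h : n < 2
      · simp [natBitsF, h]
      · rw [natBitsF, if_neg h]
        simp

theorem pyBinTail_ne_nil (n : Int) : 1 ≤ (pyBinTail n).length := by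
  unfold pyBinTail natBits
  split
  · simp
  · exact natBitsF_ne_nil _ _

-- per number, B's check equals A's padded validity test
theorem check_eq (n : Int) :
    check n =
      (if isValid (List.replicate (2 ^ hLoopF ((pyBinTail n).length + 1) 0 (pyBinTail n).length - 1
          - (pyBinTail n).length) '0' ++ pyBinTail n) then (1 : Int) else 0) := by
  have hlen := pyBinTail_ne_nil n
  have hA : hLoopF ((pyBinTail n).length + 1) 0 (pyBinTail n).length
      = hLoopF (pyBinTail n).length 1 (pyBinTail n).length := by
    rw [hLoopF, if_pos (by simpa using hlen)]
  have hB : sizeLoopF ((pyBinTail n).length + 1) 1 (pyBinTail n).length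
      = 2 ^ hLoopF ((pyBinTail n).length + 1) 1 (pyBinTail n).length - 1 := by
    simpa using sizeLoopF_eq ((pyBinTail n).length + 1) 1 (pyBinTail n).length
  have hf : hLoopF ((pyBinTail n).length + 1) 1 (pyBinTail n).length
      = hLoopF (pyBinTail n).length 1 (pyBinTail n).length :=
    hLoopF_fuel ((pyBinTail n).length + 1) (pyBinTail n).length 1 (pyBinTail n).length
      (by omega) (by omega)
  have hsize : sizeLoopF ((pyBinTail n).length + 1) 1 (pyBinTail n).length
      = 2 ^ hLoopF ((pyBinTail n).length + 1) 0 (pyBinTail n).length - 1 := by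
    rw [hB, hf, hA]
  simp only [check, hsize]
  have hfuel : stackFuel [List.replicate (2 ^ hLoopF ((pyBinTail n).length + 1) 0 (pyBinTail n).length - 1
      - (pyBinTail n).length) '0' ++ pyBinTail n]
      ≤ 2 * (2 ^ hLoopF ((pyBinTail n).length + 1) 0 (pyBinTail n).length - 1) + 1 := by
    have hpost := hLoopF_post ((pyBinTail n).length + 1) 0 (pyBinTail n).length (by omega)
    simp only [stackFuel, List.map_cons, List.map_nil, List.sum_cons, List.sum_nil,
      List.length_append, List.length_replicate]
    omega
  rw [drainF_eq_all _ _ hfuel]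
  simp only [List.all_cons, List.all_nil, Bool.and_true]

theorem foldl_append_map (f : Int → Int) (l : List Int) (acc : List Int) :
    l.foldl (fun r x => r ++ [f x]) acc = acc ++ l.map f := by
  induction l generalizing acc with
  | nil => simp
  | cons x xs ih => simp [List.foldl_cons, ih]

-- ===== VERDICT (by name: the statement is the Claim_ definition above) =====
theorem solution_spec : Claim_equal_solution := by
  intro numbers _
  unfold Spec_solution solution solution_alt
  rw [foldl_append_map
    (fun number => if isValid (List.replicate (2 ^ hLoopF ((pyBinTail number).length + 1) 0
      (pyBinTail number).length - 1 - (pyBinTail number).length) '0' ++ pyBinTail number)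
      then (1 : Int) else 0)]
  simp only [List.nil_append]
  exact List.map_congr_left (fun n _ => (check_eq n).symm)
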